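-- pv_equiv track=rewrite | github.com/BoraIlkinonu/Chatbot-KB-Maintenance-Mechanism | build_kb.py | parse_docx_markdown_sections
-- ===== SOURCE A (Python) =====
-- def parse_docx_markdown_sections(text):
--     """Parse DOCX-converted markdown into {heading: [content_lines]} sections.
--
--     DOCX lesson plans use ## H2 headings to delimit sections. Returns a dict
--     keyed by the heading text (without the ## prefix) with a list of non-empty
--     content lines as values.
--     """
--     sections = {}
--     current_heading = None
--     current_lines = []
--
--     for line in text.split("\n"):
--         stripped = line.strip()
--         if stripped.startswith("## "):
--             # Save previous section
--             if current_heading is not None: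
--                 sections[current_heading] = current_lines
--             current_heading = stripped[3:].strip()
--             current_lines = []
--         elif current_heading is not None and stripped:
--             current_lines.append(stripped)
--
--     # Save last section
--     if current_heading is not None:
--         sections[current_heading] = current_lines
--
--     return sections
-- ===== SOURCE B (Python) =====
-- def parse_docx_markdown_sections(text):
--     """Parse DOCX-converted markdown into {heading: [content_lines]} sections.
--
--     Single backward scan: walking the lines in reverse, accumulate content
--     lines until a '## ' heading is met, then record (heading, accumulated
--     content).  Finally build the dict in forward order (so duplicate
--     headings overwrite, last occurrence's content wins) and content before
--     the first heading is naturally dropped.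
--     """
--     acc = []
--     pairs = []
--     for line in reversed(text.split("\n")):
--         stripped = line.strip()
--         if stripped.startswith("## "):
--             pairs.append((stripped[3:].strip(), acc))
--             acc = []
--         elif stripped:
--             acc.append(stripped)
--     sections = {}
--     for heading, content in reversed(pairs):
--         sections[heading] = list(reversed(content))
--     return sections
-- ===== Notes on version B (the rewrite author's own statement) =====
-- stated objective: alternative
-- what changed: Replaced the forward carry-the-open-section state machine (current_heading/current_lines plus a save-on-next-heading and a final save) by a single backward scan that accumulates content until it meets a heading, followed by a forward dict build; no pending-section bookkeeping or end-of-loop save remains.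
import Mathlib
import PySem

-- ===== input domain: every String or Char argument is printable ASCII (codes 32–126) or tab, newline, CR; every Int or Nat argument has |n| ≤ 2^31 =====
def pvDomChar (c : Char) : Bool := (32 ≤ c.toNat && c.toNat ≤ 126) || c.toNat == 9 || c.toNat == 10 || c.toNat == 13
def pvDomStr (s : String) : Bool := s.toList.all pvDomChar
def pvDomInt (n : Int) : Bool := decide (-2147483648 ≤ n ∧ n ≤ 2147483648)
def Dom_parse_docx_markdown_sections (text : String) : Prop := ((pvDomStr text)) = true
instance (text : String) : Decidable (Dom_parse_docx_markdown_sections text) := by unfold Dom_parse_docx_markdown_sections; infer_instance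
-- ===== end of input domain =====

-- B replaces A's forward state machine (pending heading/lines + save-on-next-heading + final save)
-- by a backward scan accumulating content until a heading, then a forward dict build; same cost (alternative).

-- ===== PORT A =====
-- loop body of A's for-loop; state = (sections, current_heading, current_lines)
def pvStepA (st : PySem.Dict String (List String) × Option String × List String)
    (line : String) : PySem.Dict String (List String) × Option String × List String :=
  let sections := st.1
  let current_heading := st.2.1
  let current_lines := st.2.2
  let stripped := PySem.Str.strip line
  if PySem.Str.startswith stripped "## " then
    ((match current_heading with
      | some h => sections.insert h current_lines
      | none => sections),
     some (PySem.Str.strip (PySem.Str.slice stripped (some 3) none)), ([] : List String))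
  else if current_heading.isSome ∧ stripped ≠ "" then
    (sections, current_heading, current_lines ++ [stripped])
  else
    (sections, current_heading, current_lines)

-- the trailing "save last section"
def pvFinishA (st : PySem.Dict String (List String) × Option String × List String) :
    PySem.Dict String (List String) :=
  match st.2.1 with
  | some h => st.1.insert h st.2.2
  | none => st.1

def parse_docx_markdown_sections (text : String) : List (String × List String) :=
  (pvFinishA (((PySem.Str.split? text "\n").getD []).foldl pvStepA (PySem.Dict.empty, none, []))).items

-- ===== PORT B =====
-- loop body of B's backward scan; state = (acc, pairs)
def pvStepB (st : List String × List (String × List String)) (line : String) :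
    List String × List (String × List String) :=
  let stripped := PySem.Str.strip line
  if PySem.Str.startswith stripped "## " then
    (([] : List String),
     st.2 ++ [(PySem.Str.strip (PySem.Str.slice stripped (some 3) none), st.1)])
  else if stripped ≠ "" then
    (st.1 ++ [stripped], st.2)
  else
    st

def parse_docx_markdown_sections_alt (text : String) : List (String × List String) :=
  let r := (((PySem.Str.split? text "\n").getD []).reverse).foldl pvStepB ([], [])
  (r.2.reverse.foldl (fun sections p => sections.insert p.1 p.2.reverse) PySem.Dict.empty).items

-- ===== PRECONDITION & SPEC =====
def Spec_parse_docx_markdown_sections (text : String) (out : List (String × List String)) : Prop := out = parse_docx_markdown_sections_alt text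
instance (text : String) (out : List (String × List String)) : Decidable (Spec_parse_docx_markdown_sections text out) := by unfold Spec_parse_docx_markdown_sections; infer_instance

-- ===== CLAIM (what is proved, stated in full; the proofs are below) =====
def Claim_equal_parse_docx_markdown_sections : Prop := ∀ (text : String), Dom_parse_docx_markdown_sections text → Spec_parse_docx_markdown_sections text (parse_docx_markdown_sections text)

-- ===== LEMMAS AND PROOFS =====

-- spec helpers: is this line a heading, its heading text, content of a section
def pvIsHead (l : String) : Bool :=
  PySem.Chars.startswith (PySem.Chars.strip l.toList) ['#', '#', ' ']

def pvHTxt (l : String) : String :=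
  PySem.Str.strip (PySem.Str.slice (PySem.Str.strip l) (some 3) none)

def pvBody : List String → List String
  | [] => []
  | l :: rest =>
    if pvIsHead l then []
    else if PySem.Str.strip l = "" then pvBody rest
    else PySem.Str.strip l :: pvBody rest

def pvSecs : List String → List (String × List String)
  | [] => []
  | l :: rest =>
    if pvIsHead l then (pvHTxt l, pvBody rest) :: pvSecs rest else pvSecs rest

def pvIns (d : PySem.Dict String (List String)) (p : String × List String) :
    PySem.Dict String (List String) := d.insert p.1 p.2

lemma pvStepA_head (d : PySem.Dict String (List String)) (h? : Option String) (cl : List String)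
    (l : String) (hH : pvIsHead l = true) :
    pvStepA (d, h?, cl) l =
      ((match h? with | some h => d.insert h cl | none => d), some (pvHTxt l), []) := by
  cases h? <;> simp [pvStepA, pvIsHead, pvHTxt] at hH ⊢ <;> simp [hH]

lemma pvStepA_content (d : PySem.Dict String (List String)) (h : String) (cl : List String)
    (l : String) (hH : ¬ pvIsHead l = true) (hS : ¬ PySem.Str.strip l = "") :
    pvStepA (d, some h, cl) l = (d, some h, cl ++ [PySem.Str.strip l]) := by
  simp [pvStepA, pvIsHead] at hH ⊢
  simp [hH, hS]

lemma pvStepA_blank (d : PySem.Dict String (List String)) (h? : Option String) (cl : List String)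
    (l : String) (hH : ¬ pvIsHead l = true) (hS : PySem.Str.strip l = "") :
    pvStepA (d, h?, cl) l = (d, h?, cl) := by
  cases h? <;> simp [pvStepA, pvIsHead] at hH ⊢ <;> simp [hH, hS]

lemma pvStepA_none (d : PySem.Dict String (List String)) (cl : List String)
    (l : String) (hH : ¬ pvIsHead l = true) :
    pvStepA (d, none, cl) l = (d, none, cl) := by
  simp [pvStepA, pvIsHead] at hH ⊢
  simp [hH]

lemma pvA_some (lines : List String) : ∀ (d : PySem.Dict String (List String)) (h : String) (cl : List String),
    pvFinishA (lines.foldl pvStepA (d, some h, cl)) =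
      ((h, cl ++ pvBody lines) :: pvSecs lines).foldl pvIns d := by
  induction lines with
  | nil => intro d h cl; simp [pvFinishA, pvBody, pvSecs, pvIns]
  | cons l rest ih =>
    intro d h cl
    by_cases hH : pvIsHead l = true
    · rw [List.foldl_cons, pvStepA_head _ _ _ _ hH, ih]
      simp [pvSecs, pvBody, pvIns, hH]
    · by_cases hS : PySem.Str.strip l = ""
      · rw [List.foldl_cons, pvStepA_blank _ _ _ _ hH hS, ih]
        simp [pvSecs, pvBody, hH, hS]
      · rw [List.foldl_cons, pvStepA_content _ _ _ _ hH hS, ih]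
        simp [pvSecs, pvBody, pvIns, hH, hS]

lemma pvA_none (lines : List String) : ∀ (d : PySem.Dict String (List String)) (cl : List String),
    pvFinishA (lines.foldl pvStepA (d, none, cl)) = (pvSecs lines).foldl pvIns d := by
  induction lines with
  | nil => intro d cl; simp [pvFinishA, pvSecs]
  | cons l rest ih =>
    intro d cl
    by_cases hH : pvIsHead l = true
    · rw [List.foldl_cons, pvStepA_head _ _ _ _ hH, pvA_some]
      simp [pvSecs, pvIns, hH]
    · rw [List.foldl_cons, pvStepA_none _ _ _ hH, ih]
      simp [pvSecs, hH]

lemma pvStepB_head (st : List String × List (String × List String)) (l : String)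
    (hH : pvIsHead l = true) :
    pvStepB st l = ([], st.2 ++ [(pvHTxt l, st.1)]) := by
  simp [pvStepB, pvIsHead, pvHTxt] at hH ⊢
  simp [hH]

lemma pvStepB_content (st : List String × List (String × List String)) (l : String)
    (hH : ¬ pvIsHead l = true) (hS : ¬ PySem.Str.strip l = "") :
    pvStepB st l = (st.1 ++ [PySem.Str.strip l], st.2) := by
  simp [pvStepB, pvIsHead] at hH ⊢
  simp [hH, hS]

lemma pvStepB_blank (st : List String × List (String × List String)) (l : String)
    (hH : ¬ pvIsHead l = true) (hS : PySem.Str.strip l = "") :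
    pvStepB st l = st := by
  simp [pvStepB, pvIsHead] at hH ⊢
  simp [hH, hS]

lemma pvB_scan (lines : List String) :
    (lines.reverse).foldl pvStepB ([], []) =
      ((pvBody lines).reverse,
       ((pvSecs lines).map (fun p => (p.1, p.2.reverse))).reverse) := by
  induction lines with
  | nil => simp [pvBody, pvSecs]
  | cons l rest ih =>
    rw [List.reverse_cons, List.foldl_append, ih]
    simp only [List.foldl_cons, List.foldl_nil]
    by_cases hH : pvIsHead l = true
    · rw [pvStepB_head _ _ hH]
      simp [pvBody, pvSecs, hH]
    · by_cases hS : PySem.Str.strip l = ""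
      · rw [pvStepB_blank _ _ hH hS]
        simp [pvBody, pvSecs, hH, hS]
      · rw [pvStepB_content _ _ hH hS]
        simp [pvBody, pvSecs, hH, hS]

-- ===== VERDICT (by name: the statement is the Claim_ definition above) =====
theorem parse_docx_markdown_sections_spec : Claim_equal_parse_docx_markdown_sections := by
  intro text _
  unfold Spec_parse_docx_markdown_sections
  unfold parse_docx_markdown_sections parse_docx_markdown_sections_alt
  rw [pvA_none, pvB_scan]
  simp only [List.reverse_reverse, List.foldl_map, List.reverse_reverse]
  rfl
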